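-- pv_equiv track=rewrite | github.com/mratet/advent-of-code_python | solutions/2015/day_03.py | follow_direction
-- ===== SOURCE A (Python) =====
-- DIRS = {"v": (0, -1), "^": (0, 1), ">": (1, 0), "<": (-1, 0)}
--
-- def follow_direction(instructions):
--     visited = set()
--     pose = (0, 0)
--     visited.add(pose)
--
--     for c in instructions:
--         dx, dy = DIRS[c]
--         pose = (pose[0] + dx, pose[1] + dy)
--         visited.add(pose)
--
--     return visited
-- ===== SOURCE B (Python) =====
-- DIRS = {"v": (0, -1), "^": (0, 1), ">": (1, 0), "<": (-1, 0)}
--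
-- def _prefix_sums(vals):
--     total = 0
--     out = [0]
--     for v in vals:
--         total += v
--         out.append(total)
--     return out
--
-- def follow_direction(instructions):
--     deltas = [DIRS[c] for c in instructions]
--     xs = _prefix_sums(d[0] for d in deltas)
--     ys = _prefix_sums(d[1] for d in deltas)
--     return set(zip(xs, ys))
-- ===== Notes on version B (the rewrite author's own statement) =====
-- stated objective: alternative
-- what changed: Instead of threading one evolving 2-D pose and inserting into a set as it goes, B maps each instruction to its x- and y-delta, builds two independent prefix-sum sequences each starting at 0, zips them and returns set(zip(xs, ys)).
import Mathlib
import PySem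

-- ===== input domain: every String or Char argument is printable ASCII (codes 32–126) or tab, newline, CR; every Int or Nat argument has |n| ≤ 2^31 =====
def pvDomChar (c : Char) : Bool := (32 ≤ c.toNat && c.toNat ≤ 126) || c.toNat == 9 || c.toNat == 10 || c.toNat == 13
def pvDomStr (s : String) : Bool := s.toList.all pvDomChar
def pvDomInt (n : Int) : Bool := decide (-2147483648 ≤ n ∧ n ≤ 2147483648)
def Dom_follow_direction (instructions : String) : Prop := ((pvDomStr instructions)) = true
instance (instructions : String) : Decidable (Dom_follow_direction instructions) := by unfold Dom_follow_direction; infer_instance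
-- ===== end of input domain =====

-- B replaces the single evolving pose with two independent prefix-sum streams zipped at the end (objective: alternative decomposition, same cost).

-- ===== PORT A =====
def DIRS : PySem.Dict Char (Int × Int) :=
  PySem.Dict.ofList [('v', (0, -1)), ('^', (0, 1)), ('>', (1, 0)), ('<', (-1, 0))]

-- the for-loop of A: state (pose, visited); a missing key is a KeyError, excluded by Pre_
def followLoop : List Char → (Int × Int) → PySem.Set (Int × Int) → PySem.Set (Int × Int)
  | [], _, visited => visited
  | c :: cs, pose, visited =>
    match DIRS.get? c with
    | none => visited   -- Python raises KeyError here; such inputs are outside Pre_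
    | some d =>
      let p := (pose.1 + d.1, pose.2 + d.2)
      followLoop cs p (PySem.Set.add visited p)

def follow_direction (instructions : String) : List (Int × Int) :=
  followLoop instructions.toList (0, 0) (PySem.Set.add PySem.Set.empty (0, 0))

-- ===== PORT B =====
-- _prefix_sums: running totals starting from 0
def prefixSums : List Int → Int → List Int
  | [], _ => []
  | v :: vs, total => (total + v) :: prefixSums vs (total + v)

def follow_direction_alt (instructions : String) : List (Int × Int) :=
  let deltas := instructions.toList.map (fun c => (DIRS.get? c).getD (0, 0))
  let xs := 0 :: prefixSums (deltas.map Prod.fst) 0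
  let ys := 0 :: prefixSums (deltas.map Prod.snd) 0
  PySem.Set.ofList (xs.zip ys)

-- ===== PRECONDITION & SPEC =====
-- Pre_ excludes instructions containing a character outside DIRS, on which A (and B) raise KeyError.
def Pre_follow_direction (instructions : String) : Prop :=
  (instructions.toList.all (fun c => c ∈ (['v', '^', '>', '<'] : List Char))) = true
instance (instructions : String) : Decidable (Pre_follow_direction instructions) := by
  unfold Pre_follow_direction; infer_instance
def pvWitness_follow_direction : String := "^^>v<"

def Spec_follow_direction (instructions : String) (out : List (Int × Int)) : Prop := out = follow_direction_alt instructions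
instance (instructions : String) (out : List (Int × Int)) : Decidable (Spec_follow_direction instructions out) := by unfold Spec_follow_direction; infer_instance

-- ===== CLAIM (what is proved, stated in full; the proofs are below) =====
def Claim_equal_follow_direction : Prop := ∀ (instructions : String), Dom_follow_direction instructions → Pre_follow_direction instructions → Spec_follow_direction instructions (follow_direction instructions)

-- ===== LEMMAS AND PROOFS =====

-- successive poses reached from p by applying the deltas ds
def visits : List (Int × Int) → (Int × Int) → List (Int × Int)
  | [], _ => []
  | d :: ds, p => (p.1 + d.1, p.2 + d.2) :: visits ds (p.1 + d.1, p.2 + d.2)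

theorem zip_prefixSums (ds : List (Int × Int)) : ∀ (x y : Int),
    (prefixSums (ds.map Prod.fst) x).zip (prefixSums (ds.map Prod.snd) y) = visits ds (x, y) := by
  induction ds with
  | nil => intro x y; rfl
  | cons d ds ih =>
    intro x y
    simp only [List.map, prefixSums, visits, List.zip_cons_cons]
    rw [ih (x + d.1) (y + d.2)]

theorem followLoop_eq (cs : List Char) : ∀ (pose : Int × Int) (visited : PySem.Set (Int × Int)),
    (∀ c ∈ cs, c ∈ (['v', '^', '>', '<'] : List Char)) →
    followLoop cs pose visited =
      (visits (cs.map (fun c => (DIRS.get? c).getD (0, 0))) pose).foldl PySem.Set.add visited := by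
  induction cs with
  | nil => intro pose visited _; rfl
  | cons c cs ih =>
    intro pose visited h
    obtain ⟨d, hd⟩ : ∃ d, DIRS.get? c = some d := by
      rcases (by simpa using h c (by simp) : c = 'v' ∨ c = '^' ∨ c = '>' ∨ c = '<') with
        h1 | h1 | h1 | h1 <;> subst h1 <;> exact ⟨_, rfl⟩
    simp only [followLoop, hd, List.map, visits, List.foldl, Option.getD_some]
    exact ih _ _ (fun c' hc' => h c' (by simp [hc']))

theorem alt_eq (s : String) :
    follow_direction_alt s =
      PySem.Set.ofList ((0, 0) ::
        visits (s.toList.map (fun c => (DIRS.get? c).getD (0, 0))) ((0 : Int), (0 : Int))) := by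
  show PySem.Set.ofList
      ((0 :: prefixSums ((s.toList.map (fun c => (DIRS.get? c).getD (0, 0))).map Prod.fst) 0).zip
        (0 :: prefixSums ((s.toList.map (fun c => (DIRS.get? c).getD (0, 0))).map Prod.snd) 0)) = _
  rw [List.zip_cons_cons, zip_prefixSums]

-- ===== VERDICT (by name: the statement is the Claim_ definition above) =====
theorem follow_direction_spec : Claim_equal_follow_direction := by
  intro s _ hpre
  have hp : ∀ c ∈ s.toList, c ∈ (['v', '^', '>', '<'] : List Char) := by
    simpa [Pre_follow_direction] using hpre
  unfold Spec_follow_direction follow_direction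
  rw [followLoop_eq s.toList (0, 0) _ hp, alt_eq, PySem.Set.ofList_eq_foldl]
  rfl
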